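-- pv_equiv track=rewrite | github.com/soda831143/g_polymatroid-flexibility | flexitroid/utils/greedy_optimized.py | split_into_consecutive_ranges
-- ===== SOURCE A (Python) =====
-- from typing import Set, Callable, Optional
--
-- def split_into_consecutive_ranges(input_set: Set[int]) -> list:
--     """
--     将离散集合拆分为连续区间
--
--     用于b/p函数的高效计算，避免重复遍历
--
--     Example:
--         {0,1,2,7,8,9,15} -> [(0,2), (7,9), (15,15)]
--
--         时间轴:  0---1---2---3---4---5---6---7---8---9---10
--         集合:    [======]                   [====]   ↑
--                  区间1         间隙          区间2   单点
--
--     Args: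
--         input_set: 时间步索引集合
--
--     Returns:
--         List of (start, end) tuples 表示连续区间
--     """
--     if len(input_set) == 0:
--         return []
--
--     sorted_list = sorted(input_set)
--     result = []
--     start = sorted_list[0]
--
--     for i in range(1, len(sorted_list)):
--         # 检查是否连续
--         if sorted_list[i] != sorted_list[i - 1] + 1:
--             # 发现间隙，保存当前区间
--             if start == sorted_list[i - 1]:
--                 result.append((start, start))  # 单点
--             else:
--                 result.append((start, sorted_list[i - 1]))  # 区间
--             start = sorted_list[i]
--
--     # 添加最后一个区间
--     if start == sorted_list[-1]:
--         result.append((start, start))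
--     else:
--         result.append((start, sorted_list[-1]))
--
--     return result
-- ===== SOURCE B (Python) =====
-- def split_into_consecutive_ranges(input_set):
--     # Boundary-detection via set membership: an element x starts a run iff
--     # x-1 is not in the set, and ends a run iff x+1 is not in the set.
--     # Runs are disjoint and ordered, so the i-th smallest start pairs with
--     # the i-th smallest end.
--     s = set(input_set)
--     starts = sorted(x for x in s if x - 1 not in s)
--     ends = sorted(x for x in s if x + 1 not in s)
--     return list(zip(starts, ends))
-- ===== Notes on version B (the rewrite author's own statement) =====
-- stated objective: alternative
-- what changed: Replaces the sorted adjacent-gap scan with start-variable bookkeeping by a boundary-detection algorithm: hash-set membership tests find run starts (x-1 not in set) and run ends (x+1 not in set) independently, which are sorted and zipped into ranges.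
import Mathlib
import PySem

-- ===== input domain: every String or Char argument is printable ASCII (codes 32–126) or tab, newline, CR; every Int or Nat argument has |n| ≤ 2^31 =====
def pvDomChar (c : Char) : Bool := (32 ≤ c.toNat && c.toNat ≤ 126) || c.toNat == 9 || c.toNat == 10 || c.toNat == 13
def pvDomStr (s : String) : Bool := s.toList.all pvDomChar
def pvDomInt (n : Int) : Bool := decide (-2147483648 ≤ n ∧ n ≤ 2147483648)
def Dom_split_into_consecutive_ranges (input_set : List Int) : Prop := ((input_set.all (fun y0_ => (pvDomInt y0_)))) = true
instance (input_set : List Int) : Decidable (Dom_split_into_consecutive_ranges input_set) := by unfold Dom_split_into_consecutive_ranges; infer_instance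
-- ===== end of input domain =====

-- B replaces A's sorted adjacent-gap scan by boundary detection with set membership:
-- run starts are elements x with x-1 not in the set, run ends those with x+1 not in
-- the set; the sorted starts and sorted ends are zipped (alternative; same cost).

-- ===== PORT A =====
-- the List Int argument represents a Python set: its distinct elements (PySem.Set.ofList)
def split_into_consecutive_ranges (input_set : List Int) : List (Int × Int) :=
  let elems := PySem.Set.ofList input_set
  if elems.length = 0 then []
  else
    let sorted_list := PySem.List.sorted elems (fun x => x) false
    -- for i in range(1, len(sorted_list)); both indices are always in range, the 0 default is never used
    let st := (PySem.List.pyRange 1 (sorted_list.length : Int) 1).foldl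
      (fun (acc : List (Int × Int) × Int) i =>
        if PySem.List.pyGetD sorted_list i 0 ≠ PySem.List.pyGetD sorted_list (i - 1) 0 + 1 then
          (if acc.2 = PySem.List.pyGetD sorted_list (i - 1) 0 then
             acc.1 ++ [(acc.2, acc.2)]
           else
             acc.1 ++ [(acc.2, PySem.List.pyGetD sorted_list (i - 1) 0)],
           PySem.List.pyGetD sorted_list i 0)
        else acc)
      ([], PySem.List.pyGetD sorted_list 0 0)
    if st.2 = PySem.List.pyGetD sorted_list (-1) 0 then st.1 ++ [(st.2, st.2)]
    else st.1 ++ [(st.2, PySem.List.pyGetD sorted_list (-1) 0)]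

-- ===== PORT B =====
-- 'x - 1 not in s' is ported as '!decide ((x - 1) ∈ s)' (set membership); zip is List.zip
def split_into_consecutive_ranges_alt (input_set : List Int) : List (Int × Int) :=
  let s := PySem.Set.ofList input_set
  let starts := PySem.List.sorted (s.filter (fun x => !decide ((x - 1) ∈ s))) (fun x => x) false
  let ends := PySem.List.sorted (s.filter (fun x => !decide ((x + 1) ∈ s))) (fun x => x) false
  starts.zip ends

-- ===== PRECONDITION & SPEC =====
def Spec_split_into_consecutive_ranges (input_set : List Int) (out : List (Int × Int)) : Prop := out = split_into_consecutive_ranges_alt input_set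
instance (input_set : List Int) (out : List (Int × Int)) : Decidable (Spec_split_into_consecutive_ranges input_set out) := by unfold Spec_split_into_consecutive_ranges; infer_instance

-- ===== CLAIM (what is proved, stated in full; the proofs are below) =====
def Claim_equal_split_into_consecutive_ranges : Prop := ∀ (input_set : List Int), Dom_split_into_consecutive_ranges input_set → Spec_split_into_consecutive_ranges input_set (split_into_consecutive_ranges input_set)

-- ===== LEMMAS AND PROOFS =====

-- reference run decomposition both ports are reduced to
def pvRuns (start prev : Int) : List Int → List (Int × Int)
  | [] => [(start, prev)]
  | c :: rest => if c = prev + 1 then pvRuns start c rest else (start, prev) :: pvRuns c c rest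

-- ===== A side: the explicit loop computes pvRuns =====
lemma loopA (s : List Int) : ∀ (t : List Int) (j : Nat) (acc : List (Int × Int)) (start prev : Int),
    s.drop j = prev :: t →
    ((PySem.List.pyRange ((j : Int) + 1) (s.length : Int) 1).foldl
      (fun (acc : List (Int × Int) × Int) i =>
        if PySem.List.pyGetD s i 0 ≠ PySem.List.pyGetD s (i - 1) 0 + 1 then
          (if acc.2 = PySem.List.pyGetD s (i - 1) 0 then
             acc.1 ++ [(acc.2, acc.2)]
           else
             acc.1 ++ [(acc.2, PySem.List.pyGetD s (i - 1) 0)],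
           PySem.List.pyGetD s i 0)
        else acc)
      (acc, start)).1 ++
    [(((PySem.List.pyRange ((j : Int) + 1) (s.length : Int) 1).foldl
      (fun (acc : List (Int × Int) × Int) i =>
        if PySem.List.pyGetD s i 0 ≠ PySem.List.pyGetD s (i - 1) 0 + 1 then
          (if acc.2 = PySem.List.pyGetD s (i - 1) 0 then
             acc.1 ++ [(acc.2, acc.2)]
           else
             acc.1 ++ [(acc.2, PySem.List.pyGetD s (i - 1) 0)],
           PySem.List.pyGetD s i 0)
        else acc)
      (acc, start)).2, t.getLastD prev)] = acc ++ pvRuns start prev t := by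
  intro t
  induction t with
  | nil =>
    intro j acc start prev hdrop
    have hlen : s.length = j + 1 := by
      have := congrArg List.length hdrop
      simp at this
      omega
    have hnil : PySem.List.pyRange ((j : Int) + 1) (s.length : Int) 1 = [] := by
      apply PySem.List.pyRange_one_eq_nil
      omega
    simp [hnil, pvRuns]
  | cons c rest ih =>
    intro j acc start prev hdrop
    have hlen : s.length = j + 2 + rest.length := by
      have := congrArg List.length hdrop
      simp at this
      omega
    have hj : s[j]? = some prev := by
      have h0 : (s.drop j)[0]? = some prev := by rw [hdrop]; rfl
      simpa using h0
    have hj1 : s[j + 1]? = some c := by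
      have h1 : (s.drop j)[1]? = some c := by rw [hdrop]; rfl
      simpa using h1
    have hgj : PySem.List.pyGetD s ((j : Int)) 0 = prev := by
      rw [PySem.List.pyGetD_natCast]
      simp [List.getD, hj]
    have hgj1 : PySem.List.pyGetD s ((j : Int) + 1) 0 = c := by
      have hc1 : ((j : Int) + 1) = ((j + 1 : Nat) : Int) := by push_cast; ring
      rw [hc1, PySem.List.pyGetD_natCast]
      simp [List.getD, hj1]
    have hcons : PySem.List.pyRange ((j : Int) + 1) (s.length : Int) 1
        = ((j : Int) + 1) :: PySem.List.pyRange ((j : Int) + 1 + 1) (s.length : Int) 1 := by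
      apply PySem.List.pyRange_one_cons
      omega
    have hdrop' : s.drop (j + 1) = c :: rest := by
      have h2 := congrArg (List.drop 1) hdrop
      simpa [List.drop_drop] using h2
    have hcast : ((j + 1 : Nat) : Int) + 1 = (j : Int) + 1 + 1 := by push_cast; ring
    rw [hcons]
    simp only [List.foldl_cons]
    rw [show (j : Int) + 1 - 1 = (j : Int) from by ring, hgj, hgj1, List.getLastD_cons]
    by_cases hc : c = prev + 1
    · rw [if_neg (by simp [hc])]
      have hIH := ih (j + 1) acc start c hdrop'
      rw [hcast] at hIH
      rw [hIH]
      simp [pvRuns, hc]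
    · rw [if_pos (by simpa using hc)]
      have hstep : (if start = prev then acc ++ [(start, start)] else acc ++ [(start, prev)]) = acc ++ [(start, prev)] := by
        by_cases hs : start = prev <;> simp [hs]
      simp only [hstep]
      have hIH := ih (j + 1) (acc ++ [(start, prev)]) c c hdrop'
      rw [hcast] at hIH
      rw [hIH]
      simp [pvRuns, hc]

-- ===== B side: membership characterisation on a strictly increasing list =====
lemma succ_mem_iff (S : List Int) (hS : S.Pairwise (· < ·)) (i : Nat) (hi1 : i + 1 < S.length) :
    (S[i]'(by omega) + 1 ∈ S) ↔ S[i + 1] = S[i]'(by omega) + 1 := by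
  have mono := List.pairwise_iff_getElem.mp hS
  constructor
  · intro hmem
    obtain ⟨j, hj, hEq⟩ := List.mem_iff_getElem.mp hmem
    have hij : i < j := by
      by_contra hn
      push_neg at hn
      rcases Nat.lt_or_ge j i with hlt | hge
      · have := mono j i hj (by omega) hlt
        omega
      · have : j = i := by omega
        subst this
        omega
    have h1 : S[i]'(by omega) < S[i + 1] := mono i (i + 1) (by omega) hi1 (by omega)
    have h2 : S[i + 1] ≤ S[j] := by
      rcases Nat.eq_or_lt_of_le (show i + 1 ≤ j by omega) with he | hlt
      · subst he; rfl
      · exact le_of_lt (mono (i + 1) j hi1 hj hlt)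
    omega
  · intro h
    rw [← h]
    exact List.getElem_mem _

lemma pred_mem_iff (S : List Int) (hS : S.Pairwise (· < ·)) (i : Nat) (hi1 : i + 1 < S.length) :
    (S[i + 1] - 1 ∈ S) ↔ S[i + 1] = S[i]'(by omega) + 1 := by
  have mono := List.pairwise_iff_getElem.mp hS
  constructor
  · intro hmem
    obtain ⟨j, hj, hEq⟩ := List.mem_iff_getElem.mp hmem
    have hji : j < i + 1 := by
      by_contra hn
      push_neg at hn
      rcases Nat.eq_or_lt_of_le hn with he | hlt
      · subst he; omega
      · have := mono (i + 1) j hi1 hj hlt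
        omega
    have h1 : S[i]'(by omega) < S[i + 1] := mono i (i + 1) (by omega) hi1 (by omega)
    have h2 : S[j] ≤ S[i]'(by omega) := by
      rcases Nat.eq_or_lt_of_le (show j ≤ i by omega) with he | hlt
      · subst he; rfl
      · exact le_of_lt (mono j i hj (by omega) hlt)
    omega
  · intro h
    have : S[i + 1] - 1 = S[i]'(by omega) := by omega
    rw [this]
    exact List.getElem_mem _

lemma last_succ_not_mem (S : List Int) (hS : S.Pairwise (· < ·)) (hne : S ≠ []) :
    S.getLast hne + 1 ∉ S := by
  have mono := List.pairwise_iff_getElem.mp hS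
  intro hmem
  obtain ⟨j, hj, hEq⟩ := List.mem_iff_getElem.mp hmem
  rw [List.getLast_eq_getElem] at hEq
  rcases Nat.eq_or_lt_of_le (show j ≤ S.length - 1 by omega) with he | hlt
  · subst he; omega
  · have := mono j (S.length - 1) hj (by omega) hlt
    omega

lemma head_pred_not_mem (S : List Int) (hS : S.Pairwise (· < ·)) (hne : S ≠ []) :
    S.head hne - 1 ∉ S := by
  have mono := List.pairwise_iff_getElem.mp hS
  intro hmem
  obtain ⟨j, hj, hEq⟩ := List.mem_iff_getElem.mp hmem
  rw [List.head_eq_getElem] at hEq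
  rcases Nat.eq_zero_or_pos j with he | hpos
  · subst he; omega
  · have := mono 0 j (by omega) hj hpos
    omega

-- sorting a filtered set equals filtering the sorted set (distinct elements)
lemma sorted_filter (s : List Int) (p : Int → Bool)
    (hS : (PySem.List.sorted s (fun x => x) false).Pairwise (· < ·)) :
    PySem.List.sorted (s.filter p) (fun x => x) false
      = (PySem.List.sorted s (fun x => x) false).filter p :=
  PySem.List.sorted_eq_of_perm_of_pairwise_lt (s.filter p)
    ((PySem.List.sorted s (fun x => x) false).filter p) (fun x => x)
    ((PySem.List.sorted_perm s (fun x => x) false).filter p) (hS.filter p)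

-- zipping the filtered starts and ends of a strictly increasing list yields pvRuns
lemma zipRuns (ps pe : Int → Bool) : ∀ (t : List Int) (start prev : Int),
    (∀ (i : Nat) (a b : Int), (prev :: t)[i]? = some a → (prev :: t)[i + 1]? = some b →
      (ps b = !decide (b = a + 1) ∧ pe a = !decide (b = a + 1))) →
    pe ((prev :: t).getLast (by simp)) = true →
    (start :: t.filter ps).zip ((prev :: t).filter pe) = pvRuns start prev t := by
  intro t
  induction t with
  | nil =>
    intro start prev _ hlast
    simp only [List.getLast_singleton] at hlast
    simp [List.filter_cons, hlast, pvRuns]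
  | cons c rest ih =>
    intro start prev hadj hlast
    have hadj0 := hadj 0 prev c rfl rfl
    have hadj' : ∀ (i : Nat) (a b : Int), (c :: rest)[i]? = some a → (c :: rest)[i + 1]? = some b →
        (ps b = !decide (b = a + 1) ∧ pe a = !decide (b = a + 1)) := by
      intro i a b h1 h2
      exact hadj (i + 1) a b (by simpa using h1) (by simpa using h2)
    have hlast' : pe ((c :: rest).getLast (by simp)) = true := by
      rw [show (prev :: c :: rest).getLast (by simp) = (c :: rest).getLast (by simp) from
        List.getLast_cons _] at hlast
      exact hlast
    by_cases hc : c = prev + 1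
    · have hps : ps c = false := by simpa [hc] using hadj0.1
      have hpe : pe prev = false := by simpa [hc] using hadj0.2
      rw [show (prev :: c :: rest).filter pe = (c :: rest).filter pe from
            List.filter_cons_of_neg (by simp [hpe]),
          show (c :: rest).filter ps = rest.filter ps from
            List.filter_cons_of_neg (by simp [hps])]
      rw [ih start c hadj' hlast']
      simp [pvRuns, hc]
    · have hps : ps c = true := by simpa [hc] using hadj0.1
      have hpe : pe prev = true := by simpa [hc] using hadj0.2
      rw [show (prev :: c :: rest).filter pe = prev :: (c :: rest).filter pe from
            List.filter_cons_of_pos hpe,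
          show (c :: rest).filter ps = c :: rest.filter ps from
            List.filter_cons_of_pos hps]
      rw [List.zip_cons_cons]
      rw [ih c c hadj' hlast']
      simp [pvRuns, hc]

-- ===== VERDICT (by name: the statement is the Claim_ definition above) =====
theorem split_into_consecutive_ranges_spec : Claim_equal_split_into_consecutive_ranges := by
  intro input_set _
  unfold Spec_split_into_consecutive_ranges split_into_consecutive_ranges split_into_consecutive_ranges_alt
  simp only []
  have hSlt := PySem.List.sorted_ofList_pairwise_lt (xs := input_set)
  rw [sorted_filter _ _ hSlt, sorted_filter _ _ hSlt]
  have hmem : ∀ y : Int, y ∈ PySem.List.sorted (PySem.Set.ofList input_set) (fun x => x) false ↔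
      y ∈ PySem.Set.ofList input_set := by
    intro y
    exact PySem.List.mem_sorted _ _ _ y
  rcases h : PySem.List.sorted (PySem.Set.ofList input_set) (fun x => x) false with _ | ⟨x, t⟩
  · -- empty set
    have hnil : PySem.Set.ofList input_set = [] := by
      rwa [PySem.List.sorted_eq_nil_iff] at h
    rw [hnil]
    simp
  · -- nonempty: both sides reduce to pvRuns x x t
    rw [h] at hSlt hmem
    have hne : PySem.Set.ofList input_set ≠ [] := by
      intro hcon
      rw [hcon] at h
      simp [PySem.List.sorted] at h
    rw [if_neg (by simpa [List.length_eq_zero_iff] using hne)]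
    -- B side: head x starts a run; then zipRuns
    have hpsx : (!decide ((x - 1) ∈ PySem.Set.ofList input_set)) = true := by
      have := head_pred_not_mem (x :: t) hSlt (by simp)
      simp only [List.head_cons] at this
      simp [← hmem, this]
    rw [show (x :: t).filter (fun y => !decide ((y - 1) ∈ PySem.Set.ofList input_set))
          = x :: t.filter (fun y => !decide ((y - 1) ∈ PySem.Set.ofList input_set)) from
        List.filter_cons_of_pos hpsx]
    have hB := zipRuns (fun y => !decide ((y - 1) ∈ PySem.Set.ofList input_set))
        (fun y => !decide ((y + 1) ∈ PySem.Set.ofList input_set)) t x x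
      (by
        intro i a b h1 h2
        obtain ⟨hib, hEb⟩ := List.getElem?_eq_some_iff.mp h2
        obtain ⟨hia, hEa⟩ := List.getElem?_eq_some_iff.mp h1
        have hiff1 := (pred_mem_iff (x :: t) hSlt i hib)
        have hiff2 := (succ_mem_iff (x :: t) hSlt i hib)
        rw [hEa] at hiff1 hiff2
        rw [hEb] at hiff1 hiff2
        constructor
        · simp only [← hmem]
          simp [hiff1]
        · simp only [← hmem]
          simp [hiff2])
      (by
        have := last_succ_not_mem (x :: t) hSlt (by simp)
        simp [← hmem, this])
    rw [hB]
    -- A side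
    have hA := loopA (x :: t) t 0 [] x x (by simp)
    rw [show ((0 : Nat) : Int) + 1 = 1 from by norm_num] at hA
    rw [List.nil_append] at hA
    have hg0 : PySem.List.pyGetD (x :: t) 0 0 = x := by
      simp [PySem.List.pyGetD_zero_cons]
    have hglast : PySem.List.pyGetD (x :: t) (-1) 0 = t.getLastD x := by
      rw [PySem.List.pyGetD_neg_one (x :: t) 0 (List.cons_ne_nil x t)]
      exact List.getLast_eq_getLastD _
    rw [hg0, hglast]
    by_cases hfin : (((PySem.List.pyRange 1 ((x :: t).length : Int) 1).foldl
      (fun (acc : List (Int × Int) × Int) i =>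
        if PySem.List.pyGetD (x :: t) i 0 ≠ PySem.List.pyGetD (x :: t) (i - 1) 0 + 1 then
          (if acc.2 = PySem.List.pyGetD (x :: t) (i - 1) 0 then
             acc.1 ++ [(acc.2, acc.2)]
           else
             acc.1 ++ [(acc.2, PySem.List.pyGetD (x :: t) (i - 1) 0)],
           PySem.List.pyGetD (x :: t) i 0)
        else acc)
      ([], x)).2 = t.getLastD x)
    · rw [if_pos hfin]
      rw [← hfin] at hA
      exact hA
    · rw [if_neg hfin]
      exact hA
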